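-- pv_equiv track=rewrite | github.com/Carbai/AdventOfCode2023 | day_nine/main.py | get_diff2
-- ===== SOURCE A (Python) =====
-- def get_diff2(numbers: list) -> list:
--     stop=False
--     next_n=[]
--     tmp=[]
--     curr_numbers=numbers[:]
--
--     while not stop:
--         for i,n in enumerate(curr_numbers[1::]):
--             tmp.append(n-curr_numbers[i])
--         next_n.append(tmp[0])
--         curr_numbers=tmp
--         if all(x==0 for x in curr_numbers) or len(curr_numbers)==1:
--             stop=True
--         tmp=[]
--     return next_n
-- ===== SOURCE B (Python) =====
-- def get_diff2(numbers: list) -> list: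
--     diff = [numbers[i + 1] - numbers[i] for i in range(len(numbers) - 1)]
--     if all(x == 0 for x in diff) or len(diff) == 1:
--         return [diff[0]]
--     return [diff[0]] + get_diff2(diff)
-- ===== Notes on version B (the rewrite author's own statement) =====
-- stated objective: simpler
-- what changed: Replaced the while-loop with mutable tmp/next_n/stop state by a direct recursion over the difference row, building the result without any accumulator.
import Mathlib
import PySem

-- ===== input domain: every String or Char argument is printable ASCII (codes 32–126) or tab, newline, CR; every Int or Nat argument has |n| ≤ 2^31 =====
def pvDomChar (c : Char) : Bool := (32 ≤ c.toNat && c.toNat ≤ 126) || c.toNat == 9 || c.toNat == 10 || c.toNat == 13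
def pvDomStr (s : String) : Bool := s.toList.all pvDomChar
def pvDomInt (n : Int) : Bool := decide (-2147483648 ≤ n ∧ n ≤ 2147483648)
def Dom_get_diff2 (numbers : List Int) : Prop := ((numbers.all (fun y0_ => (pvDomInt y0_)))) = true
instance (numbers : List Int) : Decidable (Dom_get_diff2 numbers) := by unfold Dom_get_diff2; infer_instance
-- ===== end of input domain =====

-- B replaces A's while-loop with mutable tmp/next_n/stop state by a direct recursion over the
-- difference row (objective: simpler). Both raise (IndexError) on inputs of length < 2; Pre_ excludes those.

-- ===== PORT A =====
-- A's inner for-loop: for i,n in enumerate(curr_numbers[1::]): tmp.append(n - curr_numbers[i])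
def pvTmpA (curr : List Int) : List Int :=
  (PySem.List.enumerate (PySem.List.slice curr (some 1) none) 0).foldl
    (fun acc p => acc ++ [p.2 - PySem.List.pyGetD curr p.1 0]) []

-- used by the termination argument of the while-loop below
theorem pvTmpA_length (curr : List Int) : (pvTmpA curr).length = curr.length - 1 := by
  rw [pvTmpA, PySem.List.foldl_append_singleton_eq_map]
  simp [PySem.List.slice_from_one, PySem.List.length_enumerate]

-- A's while-loop, with its state (curr_numbers, next_n)
def get_diff2_go (curr next_n : List Int) : List Int :=
  let tmp := pvTmpA curr
  -- next_n.append(tmp[0])   (tmp[0] raises on empty tmp; Pre_ keeps tmp nonempty)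
  let next_n' := next_n ++ [PySem.List.pyGetD tmp 0 0]
  if tmp.all (fun x => x == 0) || tmp.length == 1 then next_n'
  else get_diff2_go tmp next_n'
termination_by curr.length
decreasing_by
  rename_i h
  have h' : ¬((pvTmpA curr).all (fun x => x == 0) || (pvTmpA curr).length == 1) = true := h
  rw [Bool.or_eq_true, not_or] at h'
  have h2 := pvTmpA_length curr
  have hne : (pvTmpA curr).length ≠ 0 := by
    intro h0
    have hnil : pvTmpA curr = [] := by
      apply List.eq_nil_of_length_eq_zero h0
    exact h'.1 (by rw [hnil]; rfl)
  show (pvTmpA curr).length < curr.length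
  omega

def get_diff2 (numbers : List Int) : List Int :=
  get_diff2_go (PySem.List.slice numbers none none) []

-- ===== PORT B =====
-- diff = [numbers[i + 1] - numbers[i] for i in range(len(numbers) - 1)]
def pvDiffB (numbers : List Int) : List Int :=
  (PySem.List.pyRange 0 ((numbers.length : Int) - 1) 1).map
    (fun i => PySem.List.pyGetD numbers (i + 1) 0 - PySem.List.pyGetD numbers i 0)

-- used by the termination argument of the recursion below
theorem pvDiffB_length (numbers : List Int) : (pvDiffB numbers).length = numbers.length - 1 := by
  rw [pvDiffB, List.length_map, PySem.List.length_pyRange_one]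
  omega

def get_diff2_alt (numbers : List Int) : List Int :=
  let diff := pvDiffB numbers
  if diff.all (fun x => x == 0) || diff.length == 1 then [PySem.List.pyGetD diff 0 0]
  else [PySem.List.pyGetD diff 0 0] ++ get_diff2_alt diff
termination_by numbers.length
decreasing_by
  rename_i h
  have h' : ¬((pvDiffB numbers).all (fun x => x == 0) || (pvDiffB numbers).length == 1) = true := h
  rw [Bool.or_eq_true, not_or] at h'
  have h2 := pvDiffB_length numbers
  have hne : (pvDiffB numbers).length ≠ 0 := by
    intro h0
    have hnil : pvDiffB numbers = [] := by
      apply List.eq_nil_of_length_eq_zero h0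
    exact h'.1 (by rw [hnil]; rfl)
  show (pvDiffB numbers).length < numbers.length
  omega

-- ===== PRECONDITION & SPEC =====
-- Pre_ excludes inputs of length < 2, on which Python A raises IndexError (tmp[0] on the empty first diff row).
def Pre_get_diff2 (numbers : List Int) : Prop := 2 ≤ numbers.length
instance (numbers : List Int) : Decidable (Pre_get_diff2 numbers) := by unfold Pre_get_diff2; infer_instance
def pvWitness_get_diff2 : List Int := [0, 3, 6, 9, 12, 15]

def Spec_get_diff2 (numbers : List Int) (out : List Int) : Prop := out = get_diff2_alt numbers
instance (numbers : List Int) (out : List Int) : Decidable (Spec_get_diff2 numbers out) := by unfold Spec_get_diff2; infer_instance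

-- ===== CLAIM (what is proved, stated in full; the proofs are below) =====
def Claim_equal_get_diff2 : Prop := ∀ (numbers : List Int), Dom_get_diff2 numbers → Pre_get_diff2 numbers → Spec_get_diff2 numbers (get_diff2 numbers)

-- ===== LEMMAS AND PROOFS =====

-- A's inner for-loop produces exactly B's difference comprehension
theorem pvTmpA_eq_pvDiffB (curr : List Int) : pvTmpA curr = pvDiffB curr := by
  rw [pvTmpA, pvDiffB, PySem.List.foldl_append_singleton_eq_map, PySem.List.slice_from_one,
    PySem.List.enumerate_eq_map_pyRange (d := 0), List.map_map, List.nil_append]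
  have hb : PySem.List.len curr.tail = max ((curr.length : Int) - 1) 0 := by
    simp [PySem.List.len, List.length_tail]; omega
  rw [hb]
  have hrange : PySem.List.pyRange 0 (max ((curr.length : Int) - 1) 0) 1
      = PySem.List.pyRange 0 ((curr.length : Int) - 1) 1 := by
    by_cases h : 0 ≤ (curr.length : Int) - 1
    · rw [max_eq_left h]
    · rw [max_eq_right (by omega), PySem.List.pyRange_one_eq_nil (by omega),
        PySem.List.pyRange_one_eq_nil (by omega)]
  rw [hrange]
  apply List.map_congr_left
  intro j hj
  rw [PySem.List.mem_pyRange_one] at hj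
  simp only [Function.comp]
  have h0 : 0 ≤ j := hj.1
  have h1 : j < (curr.length : Int) - 1 := hj.2
  congr 1
  lift j to ℕ using h0 with k
  rw [PySem.List.pyGetD_natCast]
  have hk1 : ((k : Int) + 1) = ((k + 1 : ℕ) : Int) := by push_cast; ring
  rw [hk1, PySem.List.pyGetD_natCast]
  simp [List.getD_eq_getElem?_getD, List.getElem?_tail]

theorem go_eq_alt (curr next_n : List Int) :
    get_diff2_go curr next_n = next_n ++ get_diff2_alt curr := by
  rw [get_diff2_go, get_diff2_alt]
  simp only [pvTmpA_eq_pvDiffB]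
  split
  · rfl
  · rw [go_eq_alt]
    simp
termination_by curr.length
decreasing_by
  rename_i h
  rw [Bool.or_eq_true, not_or] at h
  have h2 := pvDiffB_length curr
  have hne : (pvDiffB curr).length ≠ 0 := by
    intro h0
    have hnil : pvDiffB curr = [] := by
      apply List.eq_nil_of_length_eq_zero h0
    exact h.1 (by rw [hnil]; rfl)
  omega

-- ===== VERDICT (by name: the statement is the Claim_ definition above) =====
theorem get_diff2_spec : Claim_equal_get_diff2 := by
  intro numbers _ _
  unfold Spec_get_diff2 get_diff2
  rw [PySem.List.slice_none_none, go_eq_alt, List.nil_append]
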